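-- pv_equiv track=rewrite | github.com/labman-1/Ember | archive/importers/postgres_importer.py | _sql_values_to_csv_row
-- ===== SOURCE A (Python) =====
-- def _sql_values_to_csv_row(values_str: str, columns: list) -> str:
--     """将 SQL VALUES 转换为 CSV 行"""
--     # 简单处理：移除引号内的逗号问题
--     parts = []
--     in_quote = False
--     current = []
--     quote_char = None
--
--     for char in values_str:
--         if char in ("'", '"') and not in_quote:
--             in_quote = True
--             quote_char = char
--         elif char == quote_char and in_quote:
--             in_quote = False
--             quote_char = None
--         elif char == "," and not in_quote:
--             parts.append("".join(current).strip())
--             current = []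
--             continue
--         current.append(char)
--
--     if current:
--         parts.append("".join(current).strip())
--
--     # 转换为 CSV 格式
--     csv_parts = []
--     for part in parts:
--         part = part.strip()
--         if part.upper() == "NULL":
--             csv_parts.append("NULL")
--         elif part.startswith("'") and part.endswith("'"):
--             # 移除 SQL 引号，CSV 会自动处理
--             csv_parts.append(part[1:-1].replace("''", "'"))
--         else:
--             csv_parts.append(part)
--
--     return ",".join(csv_parts)
-- ===== SOURCE B (Python) =====
-- def _field_end(s):
--     """Index in s of the first top-level (unquoted) comma, or len(s) if none."""
--     q = None
--     for i, ch in enumerate(s):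
--         if q is None:
--             if ch == ",":
--                 return i
--             if ch in ("'", '"'):
--                 q = ch
--         elif ch == q:
--             q = None
--     return len(s)
--
--
-- def _csv_field(f):
--     f = f.strip()
--     if f.upper() == "NULL":
--         return "NULL"
--     if f.startswith("'") and f.endswith("'"):
--         return f[1:-1].replace("''", "'")
--     return f
--
--
-- def _sql_values_to_csv_row(values_str: str, columns: list) -> str:
--     """Consume the string field by field: repeatedly locate the next top-level
--     comma and slice the whole field off the front (no per-character buffer)."""
--     fields = []
--     s = values_str
--     while s:
--         j = _field_end(s)
--         if j == len(s):
--             fields.append(s)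
--             break
--         fields.append(s[:j])
--         s = s[j + 1:]
--     return ",".join(_csv_field(f) for f in fields)
-- ===== Notes on version B (the rewrite author's own statement) =====
-- stated objective: alternative
-- what changed: Replaced A's per-character buffer accumulation (fold pushing each char into a current list, emitting it at commas) by a field-at-a-time consumer: a helper locates the next top-level comma's index and the whole field is sliced off the front of the remaining string, fields being converted on join.
import Mathlib
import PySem

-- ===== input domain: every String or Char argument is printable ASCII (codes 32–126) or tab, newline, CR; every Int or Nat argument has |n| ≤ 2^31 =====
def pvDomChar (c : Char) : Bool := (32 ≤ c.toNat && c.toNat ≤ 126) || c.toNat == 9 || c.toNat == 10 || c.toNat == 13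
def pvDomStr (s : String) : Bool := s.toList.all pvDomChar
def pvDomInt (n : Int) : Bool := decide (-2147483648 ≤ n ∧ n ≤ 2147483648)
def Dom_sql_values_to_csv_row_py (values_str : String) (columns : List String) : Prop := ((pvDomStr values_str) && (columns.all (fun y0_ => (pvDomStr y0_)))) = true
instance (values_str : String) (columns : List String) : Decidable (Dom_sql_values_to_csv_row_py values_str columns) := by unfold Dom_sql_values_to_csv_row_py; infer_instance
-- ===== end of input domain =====

-- B replaces A's per-character buffer accumulation by a field-at-a-time consumer:
-- find the next top-level comma's index, slice the field off the front, repeat; same task, alternative decomposition.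

-- ===== PORT A =====
-- body of A's `for char in values_str` loop; state = (parts, in_quote, current, quote_char)
def pvStepA : (List (List Char) × Bool × List Char × Option Char) → Char →
    (List (List Char) × Bool × List Char × Option Char)
  | (parts, in_quote, current, quote_char), c =>
    if (c == '\'' || c == '"') && !in_quote then
      (parts, true, current ++ [c], some c)
    else if some c == quote_char && in_quote then
      (parts, false, current ++ [c], none)
    else if c == ',' && !in_quote then
      (parts ++ [PySem.Chars.strip current], in_quote, [], quote_char)
    else
      (parts, in_quote, current ++ [c], quote_char)

def sql_values_to_csv_row_py (values_str : String) (columns : List String) : String :=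
  let st := values_str.toList.foldl pvStepA ([], false, [], none)
  let parts := if st.2.2.1.isEmpty then st.1 else st.1 ++ [PySem.Chars.strip st.2.2.1]
  let csv_parts := parts.map (fun part =>
    let part := PySem.Chars.strip part
    if PySem.Chars.upper part == "NULL".toList then "NULL".toList
    else if PySem.Chars.startswith part ['\''] && PySem.Chars.endswith part ['\''] then
      PySem.Chars.replace (PySem.List.slice part (some 1) (some (-1))) ['\'', '\''] ['\'']
    else part)
  String.mk (PySem.Chars.join [','] csv_parts)

-- ===== PORT B =====
-- B's `_field_end`: index of the first top-level comma, or the length (early-return loop as recursion)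
def pvFieldEnd (q : Option Char) : List Char → Nat
  | [] => 0
  | c :: cs =>
    match q with
    | none =>
      if c = ',' then 0
      else pvFieldEnd (if c = '\'' ∨ c = '"' then some c else none) cs + 1
    | some t => pvFieldEnd (if c = t then none else some t) cs + 1

-- B's `_csv_field`
def pvCsvField (f : List Char) : List Char :=
  let f := PySem.Chars.strip f
  if PySem.Chars.upper f == "NULL".toList then "NULL".toList
  else if PySem.Chars.startswith f ['\''] && PySem.Chars.endswith f ['\''] then
    PySem.Chars.replace (PySem.List.slice f (some 1) (some (-1))) ['\'', '\''] ['\'']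
  else f

-- B's `while s:` loop collecting the raw fields by slicing
def pvCollect (s : List Char) : List (List Char) :=
  if hs : s = [] then []
  else if h : pvFieldEnd none s = s.length then [s]
  else s.take (pvFieldEnd none s) :: pvCollect (s.drop (pvFieldEnd none s + 1))
termination_by s.length
decreasing_by
  cases s with
  | nil => exact absurd rfl hs
  | cons a t => simp only [List.length_drop, List.length_cons]; omega

def sql_values_to_csv_row_py_alt (values_str : String) (columns : List String) : String :=
  String.mk (PySem.Chars.join [','] ((pvCollect values_str.toList).map pvCsvField))

-- ===== PRECONDITION & SPEC =====
def Spec_sql_values_to_csv_row_py (values_str : String) (columns : List String) (out : String) : Prop := out = sql_values_to_csv_row_py_alt values_str columns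
instance (values_str : String) (columns : List String) (out : String) : Decidable (Spec_sql_values_to_csv_row_py values_str columns out) := by unfold Spec_sql_values_to_csv_row_py; infer_instance

-- ===== CLAIM (what is proved, stated in full; the proofs are below) =====
def Claim_equal_sql_values_to_csv_row_py : Prop := ∀ (values_str : String) (columns : List String), Dom_sql_values_to_csv_row_py values_str columns → Spec_sql_values_to_csv_row_py values_str columns (sql_values_to_csv_row_py values_str columns)

-- ===== LEMMAS AND PROOFS =====

-- proof-side: the sequence of top-level segments of cs starting in quote state q (always nonempty)
def pvSegs (q : Option Char) (s : List Char) : List (List Char) :=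
  if h : pvFieldEnd q s = s.length then [s]
  else s.take (pvFieldEnd q s) :: pvSegs none (s.drop (pvFieldEnd q s + 1))
termination_by s.length
decreasing_by
  cases s with
  | nil => exact absurd (by cases q <;> rfl) h
  | cons a t => simp only [List.length_drop, List.length_cons]; omega

theorem pvSegs_ne_nil (q : Option Char) (s : List Char) : pvSegs q s ≠ [] := by
  rw [pvSegs]
  split <;> simp

theorem pvSegs_nil (q : Option Char) : pvSegs q [] = [[]] := by
  rw [pvSegs]
  rw [dif_pos (show pvFieldEnd q [] = ([] : List Char).length by cases q <;> rfl)]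

theorem pvSegs_comma (cs : List Char) : pvSegs none (',' :: cs) = [] :: pvSegs none cs := by
  conv_lhs => rw [pvSegs]
  have h0 : pvFieldEnd none (',' :: cs) = 0 := by simp [pvFieldEnd]
  rw [dif_neg (by rw [h0]; simp)]
  rw [h0]
  simp

-- one non-top-level-comma character is prepended to the head segment
theorem pvSegs_cons (q : Option Char) (c : Char) (cs : List Char) (q' : Option Char)
    (hq : (match q with
           | none => ¬ c = ',' ∧ q' = (if c = '\'' ∨ c = '"' then some c else none)
           | some t => q' = (if c = t then none else some t))) :
    pvSegs q (c :: cs) = (c :: (pvSegs q' cs).headI) :: (pvSegs q' cs).tail := by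
  have hfe : pvFieldEnd q (c :: cs) = pvFieldEnd q' cs + 1 := by
    cases q with
    | none => simp only [pvFieldEnd, if_neg hq.1, hq.2]
    | some t => simp only [pvFieldEnd, hq]
  conv_lhs => rw [pvSegs]
  rw [hfe]
  by_cases h : pvFieldEnd q' cs = cs.length
  · rw [dif_pos (by simp [h])]
    conv_rhs => rw [pvSegs]
    rw [dif_pos h]
    rfl
  · rw [dif_neg (by simp; omega)]
    conv_rhs => rw [pvSegs]
    rw [dif_neg h]
    simp [List.take_succ_cons, List.drop_succ_cons]

-- B's field collector in terms of pvSegs: keep all segments, dropping a trailing empty one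
theorem pvCollect_eq (s : List Char) :
    pvCollect s = if (pvSegs none s).getLastD [] = [] then (pvSegs none s).dropLast
                  else pvSegs none s := by
  by_cases hs : s = []
  · subst hs
    rw [pvCollect, pvSegs_nil]
    simp
  · rw [pvCollect, dif_neg hs]
    by_cases h : pvFieldEnd none s = s.length
    · rw [dif_pos h]
      conv_rhs => rw [pvSegs]
      rw [dif_pos h]
      simp [hs]
    · rw [dif_neg h]
      rw [pvCollect_eq (s.drop (pvFieldEnd none s + 1))]
      conv_rhs => rw [pvSegs]
      rw [dif_neg h]
      cases hsegs : pvSegs none (s.drop (pvFieldEnd none s + 1)) with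
      | nil => exact absurd hsegs (pvSegs_ne_nil _ _)
      | cons a t =>
        simp only [List.getLastD_cons]
        exact apply_ite (fun l => List.take (pvFieldEnd none s) s :: l) _ _ _
termination_by s.length
decreasing_by
  cases s with
  | nil => exact absurd rfl hs
  | cons x xs => simp only [List.length_drop, List.length_cons]; omega

theorem pv_dropWhile_idem (p : Char → Bool) (l : List Char) :
    (l.dropWhile p).dropWhile p = l.dropWhile p := by
  induction l with
  | nil => rfl
  | cons a t ih =>
    by_cases h : p a = true
    · simp [List.dropWhile_cons, h, ih]
    · simp [List.dropWhile_cons, h]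

theorem pv_dropWhile_prefix (p : Char → Bool) (l l' : List Char)
    (hl : l.dropWhile p = l) (hp : l' <+: l) : l'.dropWhile p = l' := by
  cases l' with
  | nil => rfl
  | cons a t =>
    cases l with
    | nil => simp at hp
    | cons b s =>
      have hab : a = b := by
        rcases hp with ⟨u, hu⟩
        obtain ⟨hab, -⟩ : a = b ∧ t ++ u = s := by simpa using hu
        exact hab
      subst hab
      by_cases h : p a = true
      · exfalso
        rw [List.dropWhile_cons, if_pos h] at hl
        have := congrArg List.length hl
        have h2 := List.length_dropWhile_le p s
        simp at this; omega
      · simp [List.dropWhile_cons, h]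

theorem pv_rstrip_idem (x : List Char) :
    PySem.Chars.rstrip (PySem.Chars.rstrip x) = PySem.Chars.rstrip x := by
  simp [PySem.Chars.rstrip, pv_dropWhile_idem]

theorem pv_strip_idem (s : List Char) :
    PySem.Chars.strip (PySem.Chars.strip s) = PySem.Chars.strip s := by
  simp only [PySem.Chars.strip]
  have h1 : PySem.Chars.lstrip (PySem.Chars.rstrip (PySem.Chars.lstrip s)) =
      PySem.Chars.rstrip (PySem.Chars.lstrip s) := by
    apply pv_dropWhile_prefix _ _ _ (pv_dropWhile_idem _ s)
    simp only [PySem.Chars.rstrip, PySem.Chars.lstrip]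
    have := List.dropWhile_suffix (l := (List.dropWhile PySem.Chars.isspace s).reverse)
      (p := PySem.Chars.isspace)
    rw [← List.reverse_prefix] at this
    simpa using this
  rw [h1, pv_rstrip_idem]

theorem pv_csv_strip (x : List Char) :
    pvCsvField (PySem.Chars.strip x) = pvCsvField x := by
  simp only [pvCsvField, pv_strip_idem]

-- A's fold tracks the segment decomposition: parts collects the stripped segments
-- before the last one (with cur prefixed to the first), current is the last one.
theorem pv_foldA (cs : List Char) : ∀ (q : Option Char) (cur : List Char) (parts : List (List Char)),
    (List.foldl pvStepA (parts, q.isSome, cur, q) cs).1 =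
      parts ++ (((cur ++ (pvSegs q cs).headI) :: (pvSegs q cs).tail).dropLast).map PySem.Chars.strip ∧
    (List.foldl pvStepA (parts, q.isSome, cur, q) cs).2.2.1 =
      ((cur ++ (pvSegs q cs).headI) :: (pvSegs q cs).tail).getLastD [] := by
  induction cs with
  | nil =>
    intro q cur parts
    simp [pvSegs_nil]
  | cons c rest ih =>
    intro q cur parts
    cases q with
    | none =>
      by_cases hqt : c = '\'' ∨ c = '"'
      · have hstep : pvStepA (parts, false, cur, none) c = (parts, true, cur ++ [c], some c) := by
          rcases hqt with h | h <;> subst h <;> rfl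
        have hseg := pvSegs_cons none c rest (some c)
          (by constructor
              · rcases hqt with h | h <;> subst h <;> decide
              · rw [if_pos hqt])
        simp only [List.foldl_cons, Option.isSome_none, hstep]
        have := ih (some c) (cur ++ [c]) parts
        simp only [Option.isSome_some] at this
        rw [hseg]
        simpa [List.append_assoc] using this
      · push_neg at hqt
        by_cases hc : c = ','
        · subst hc
          have hstep : pvStepA (parts, false, cur, none) ',' =
              (parts ++ [PySem.Chars.strip cur], false, [], none) := rfl
          simp only [List.foldl_cons, Option.isSome_none, hstep]
          have := ih none [] (parts ++ [PySem.Chars.strip cur])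
          simp only [Option.isSome_none, List.nil_append] at this
          rw [pvSegs_comma]
          have hne := pvSegs_ne_nil none rest
          cases hsegs : pvSegs none rest with
          | nil => exact absurd hsegs hne
          | cons a t =>
            rw [hsegs] at this
            constructor
            · rw [this.1]; simp [List.append_assoc]
            · rw [this.2]; simp
        · have hstep : pvStepA (parts, false, cur, none) c = (parts, false, cur ++ [c], none) := by
            simp only [pvStepA]
            rw [if_neg, if_neg, if_neg]
            · simp [hc]
            · simp
            · simp [hqt.1, hqt.2]
          have hseg := pvSegs_cons none c rest none
            (by exact ⟨hc, by rw [if_neg (by simp [hqt.1, hqt.2])]⟩)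
          simp only [List.foldl_cons, Option.isSome_none, hstep]
          have := ih none (cur ++ [c]) parts
          simp only [Option.isSome_none] at this
          rw [hseg]
          simpa [List.append_assoc] using this
    | some t =>
      by_cases hc : c = t
      · subst hc
        have hstep : pvStepA (parts, true, cur, some c) c = (parts, false, cur ++ [c], none) := by
          simp [pvStepA]
        have hseg := pvSegs_cons (some c) c rest none
          (by show none = if c = c then none else some c
              simp)
        simp only [List.foldl_cons, Option.isSome_some, hstep]
        have := ih none (cur ++ [c]) parts
        simp only [Option.isSome_none] at this
        rw [hseg]
        simpa [List.append_assoc] using this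
      · have hstep : pvStepA (parts, true, cur, some t) c = (parts, true, cur ++ [c], some t) := by
          simp only [pvStepA]
          rw [if_neg, if_neg, if_neg]
          · simp
          · simp [hc]
          · simp
        have hseg := pvSegs_cons (some t) c rest (some t)
          (by show some t = if c = t then none else some t
              rw [if_neg hc])
        simp only [List.foldl_cons, Option.isSome_some, hstep]
        have := ih (some t) (cur ++ [c]) parts
        simp only [Option.isSome_some] at this
        rw [hseg]
        simpa [List.append_assoc] using this

-- ===== VERDICT (by name: the statement is the Claim_ definition above) =====
theorem sql_values_to_csv_row_py_spec : Claim_equal_sql_values_to_csv_row_py := by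
  intro values_str columns _
  unfold Spec_sql_values_to_csv_row_py
  unfold sql_values_to_csv_row_py sql_values_to_csv_row_py_alt
  have h := pv_foldA values_str.toList none [] []
  simp only [Option.isSome_none, List.nil_append] at h
  have hne := pvSegs_ne_nil none values_str.toList
  cases hsegs : pvSegs none values_str.toList with
  | nil => exact absurd hsegs hne
  | cons a t =>
    rw [hsegs] at h
    simp only [List.headI, List.tail] at h
    rw [pvCollect_eq values_str.toList, hsegs]
    refine congrArg String.mk (congrArg (PySem.Chars.join [',']) ?_)
    rw [h.1, h.2]
    by_cases hl : (a :: t).getLastD ([] : List Char) = []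
    · rw [if_pos hl, hl]
      simp only [List.isEmpty_nil, if_true]
      rw [List.map_map]
      exact List.map_congr_left fun part _ => pv_csv_strip part
    · rw [if_neg hl]
      have hnnil : ((a :: t).getLastD ([] : List Char)).isEmpty = false := by
        cases hx : (a :: t).getLastD ([] : List Char) with
        | nil => exact absurd hx hl
        | cons _ _ => rfl
      simp only [hnnil, Bool.false_eq_true, if_false]
      have hfull : a :: t = (a :: t).dropLast ++ [(a :: t).getLastD []] := by
        have h1 : (a :: t).getLastD [] = (a :: t).getLast (by simp) := by
          rw [List.getLastD_eq_getLast?, List.getLast?_eq_getLast (by simp)]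
          rfl
        rw [h1, List.dropLast_append_getLast]
      conv_rhs => rw [hfull]
      rw [List.map_append, List.map_append, List.map_map]
      congr 1
      · exact List.map_congr_left fun part _ => pv_csv_strip part
      · simp only [List.map_cons, List.map_nil]
        exact congrArg (fun x => [x]) (pv_csv_strip ((a :: t).getLastD []))
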